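-- pv_equiv track=rewrite | github.com/ferdinandbr/lgpd-compliance-architect | scripts/generate_report.py | compliance_rating
-- ===== SOURCE A (Python) =====
-- def compliance_rating(findings):
--     if not findings:
--         return "Compliant"
--     severities = {f["severity"] for f in findings}
--     if "CRITICAL" in severities:
--         return "Non-Compliant"
--     if "HIGH" in severities:
--         return "At Risk"
--     if "MEDIUM" in severities:
--         return "Needs Improvement"
--     return "Needs Improvement"
-- ===== SOURCE B (Python) =====
-- def compliance_rating(findings):
--     if not findings:
--         return "Compliant"
--     top = 1
--     for f in findings:
--         s = f["severity"]
--         p = 3 if s == "CRITICAL" else 2 if s == "HIGH" else 1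
--         if p > top:
--             top = p
--     return "Non-Compliant" if top == 3 else "At Risk" if top == 2 else "Needs Improvement"
-- ===== Notes on version B (the rewrite author's own statement) =====
-- stated objective: simpler
-- what changed: Replaced building a severity set plus a cascade of membership tests by a single fold that keeps a running maximum priority (CRITICAL=3, HIGH=2, other=1) mapped to the rating at the end.
import Mathlib
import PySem

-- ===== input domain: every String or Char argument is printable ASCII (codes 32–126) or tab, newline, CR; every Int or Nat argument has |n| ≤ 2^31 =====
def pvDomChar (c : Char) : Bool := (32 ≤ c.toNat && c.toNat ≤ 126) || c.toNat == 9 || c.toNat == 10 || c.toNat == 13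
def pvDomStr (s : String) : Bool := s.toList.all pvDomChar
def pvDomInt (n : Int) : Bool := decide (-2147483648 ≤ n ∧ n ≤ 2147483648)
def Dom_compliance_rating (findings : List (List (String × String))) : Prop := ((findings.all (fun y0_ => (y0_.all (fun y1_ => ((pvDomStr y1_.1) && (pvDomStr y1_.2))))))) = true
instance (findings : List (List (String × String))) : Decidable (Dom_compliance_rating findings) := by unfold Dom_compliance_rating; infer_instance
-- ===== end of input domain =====

-- B replaces A's severity set + membership cascade by one fold keeping a running maximum priority (simpler decomposition, same cost).


-- f["severity"] on an association-list dict: first match; Pre_ guarantees the key is present (Python raises KeyError otherwise)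
def pvSev (f : List (String × String)) : String := (f.lookup "severity").getD ""

-- ===== PORT A =====
def compliance_rating (findings : List (List (String × String))) : String :=
  if findings = [] then "Compliant"
  else
    let severities : PySem.Set String := PySem.Set.ofList (findings.map pvSev)
    if "CRITICAL" ∈ severities then "Non-Compliant"
    else if "HIGH" ∈ severities then "At Risk"
    else if "MEDIUM" ∈ severities then "Needs Improvement"
    else "Needs Improvement"

-- ===== PORT B =====
def pvPrio (s : String) : Nat := if s = "CRITICAL" then 3 else if s = "HIGH" then 2 else 1

def compliance_rating_alt (findings : List (List (String × String))) : String :=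
  if findings = [] then "Compliant"
  else
    let top := findings.foldl (fun m f => max m (pvPrio (pvSev f))) 1
    if top = 3 then "Non-Compliant" else if top = 2 then "At Risk" else "Needs Improvement"

-- ===== PRECONDITION & SPEC =====
-- Pre_ excludes findings missing the "severity" key, on which Python A (and B) raises KeyError.
def Pre_compliance_rating (findings : List (List (String × String))) : Prop :=
  (findings.all (fun f => f.any (fun p => p.1 == "severity"))) = true
instance (findings : List (List (String × String))) : Decidable (Pre_compliance_rating findings) := by unfold Pre_compliance_rating; infer_instance
def pvWitness_compliance_rating : (List (List (String × String))) := [[("severity", "HIGH")], [("severity", "LOW"), ("id", "1")]]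

def Spec_compliance_rating (findings : List (List (String × String))) (out : String) : Prop := out = compliance_rating_alt findings
instance (findings : List (List (String × String))) (out : String) : Decidable (Spec_compliance_rating findings out) := by unfold Spec_compliance_rating; infer_instance

-- ===== CLAIM (what is proved, stated in full; the proofs are below) =====
def Claim_equal_compliance_rating : Prop := ∀ (findings : List (List (String × String))), Dom_compliance_rating findings → Pre_compliance_rating findings → Spec_compliance_rating findings (compliance_rating findings)

-- ===== LEMMAS AND PROOFS =====
def pvMaxP (l : List (List (String × String))) : Nat :=
  l.foldr (fun f m => max (pvPrio (pvSev f)) m) 0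

theorem pvMaxP_cons (f : List (String × String)) (t : List (List (String × String))) :
    pvMaxP (f :: t) = max (pvPrio (pvSev f)) (pvMaxP t) := rfl

theorem pvPrio_le (s : String) : pvPrio s ≤ 3 := by
  unfold pvPrio; split_ifs <;> omega

theorem pvPrio_eq_three (s : String) : pvPrio s = 3 ↔ s = "CRITICAL" := by
  unfold pvPrio; split_ifs with h1 h2 <;> simp_all

theorem two_le_pvPrio (s : String) : 2 ≤ pvPrio s ↔ s = "CRITICAL" ∨ s = "HIGH" := by
  unfold pvPrio; split_ifs with h1 h2 <;> simp_all

theorem foldl_eq_max (l : List (List (String × String))) :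
    ∀ acc, l.foldl (fun m f => max m (pvPrio (pvSev f))) acc = max acc (pvMaxP l) := by
  induction l with
  | nil => intro acc; simp [pvMaxP]
  | cons f t ih =>
    intro acc
    simp only [List.foldl_cons, pvMaxP, List.foldr_cons, ih]
    omega

theorem pvMaxP_le (l : List (List (String × String))) : pvMaxP l ≤ 3 := by
  induction l with
  | nil => simp [pvMaxP]
  | cons f t ih =>
    have := pvPrio_le (pvSev f)
    simp only [pvMaxP, List.foldr_cons] at *
    omega

theorem pvMaxP_eq_three (l : List (List (String × String))) :
    pvMaxP l = 3 ↔ ∃ f ∈ l, pvSev f = "CRITICAL" := by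
  induction l with
  | nil => simp [pvMaxP]
  | cons f t ih =>
    have h3 := pvPrio_eq_three (pvSev f)
    have hle := pvPrio_le (pvSev f)
    have hle' := pvMaxP_le t
    rw [pvMaxP_cons]
    constructor
    · intro h
      rcases (by omega : pvPrio (pvSev f) = 3 ∨ pvMaxP t = 3) with h' | h'
      · exact ⟨f, by simp, h3.mp h'⟩
      · rcases ih.mp h' with ⟨g, hg, hgs⟩
        exact ⟨g, by simp [hg], hgs⟩
    · rintro ⟨g, hg, hgs⟩
      rcases List.mem_cons.mp hg with rfl | hg'
      · have := h3.mpr hgs; omega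
      · have := ih.mpr ⟨g, hg', hgs⟩; omega

theorem two_le_pvMaxP (l : List (List (String × String))) :
    2 ≤ pvMaxP l ↔ ∃ f ∈ l, pvSev f = "CRITICAL" ∨ pvSev f = "HIGH" := by
  induction l with
  | nil => simp [pvMaxP]
  | cons f t ih =>
    have h2 := two_le_pvPrio (pvSev f)
    rw [pvMaxP_cons]
    constructor
    · intro h
      rcases (by omega : 2 ≤ pvPrio (pvSev f) ∨ 2 ≤ pvMaxP t) with h' | h'
      · exact ⟨f, by simp, h2.mp h'⟩
      · rcases ih.mp h' with ⟨g, hg, hgs⟩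
        exact ⟨g, by simp [hg], hgs⟩
    · rintro ⟨g, hg, hgs⟩
      rcases List.mem_cons.mp hg with rfl | hg'
      · have := h2.mpr hgs; omega
      · have := ih.mpr ⟨g, hg', hgs⟩; omega

theorem mem_severities (l : List (List (String × String))) (s : String) :
    s ∈ PySem.Set.ofList (l.map pvSev) ↔ ∃ f ∈ l, pvSev f = s := by
  rw [PySem.Set.mem_ofList, List.mem_map]

-- ===== VERDICT (by name: the statement is the Claim_ definition above) =====
theorem compliance_rating_spec : Claim_equal_compliance_rating := by
  intro findings _ _
  unfold Spec_compliance_rating compliance_rating compliance_rating_alt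
  by_cases hnil : findings = []
  · simp [hnil]
  · simp only [if_neg hnil, foldl_eq_max]
    have hle := pvMaxP_le findings
    by_cases hc : ∃ f ∈ findings, pvSev f = "CRITICAL"
    · have hm : pvMaxP findings = 3 := (pvMaxP_eq_three findings).mpr hc
      rw [if_pos ((mem_severities findings _).mpr hc)]
      rw [hm]
      simp
    · rw [if_neg (fun h => hc ((mem_severities findings _).mp h))]
      have hm3 : pvMaxP findings ≠ 3 := fun h => hc ((pvMaxP_eq_three findings).mp h)
      by_cases hh : ∃ f ∈ findings, pvSev f = "HIGH"
      · have h2 : 2 ≤ pvMaxP findings := (two_le_pvMaxP findings).mpr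
          (by rcases hh with ⟨g, hg, hgs⟩; exact ⟨g, hg, Or.inr hgs⟩)
        have hm : pvMaxP findings = 2 := by omega
        rw [if_pos ((mem_severities findings _).mpr hh), hm]
        simp
      · have h2 : ¬ 2 ≤ pvMaxP findings := by
          intro h
          rcases (two_le_pvMaxP findings).mp h with ⟨g, hg, hgs | hgs⟩
          · exact hc ⟨g, hg, hgs⟩
          · exact hh ⟨g, hg, hgs⟩
        have hm : max 1 (pvMaxP findings) = 1 := by omega
        rw [if_neg (fun h => hh ((mem_severities findings _).mp h)), hm]
        by_cases hmed : "MEDIUM" ∈ PySem.Set.ofList (findings.map pvSev) <;> simp [hmed]
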